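-- pv_equiv track=rewrite | github.com/casseyprovenzano461861-del/clawai | 优秀项目/NeuroSploit-main/backend/core/knowledge_processor.py | _extract_payloads_by_pattern
-- ===== SOURCE A (Python) =====
-- from typing import List, Dict, Optional, Any
--
-- def _extract_payloads_by_pattern(text: str, keywords: List[str]) -> List[str]:
--     """Extract text fragments near specific keywords."""
--     results = []
--     text_lower = text.lower()
--     for keyword in keywords:
--         idx = text_lower.find(keyword)
--         if idx >= 0:
--             start = max(0, idx - 20)
--             end = min(len(text), idx + 200)
--             fragment = text[start:end].strip()
--             if fragment:
--                 results.append(fragment[:200])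
--     return results[:10]
-- ===== SOURCE B (Python) =====
-- from typing import List
--
--
-- def _extract_payloads_by_pattern(text: str, keywords: List[str]) -> List[str]:
--     """Extract text fragments near specific keywords.
--
--     Recursively walks the keyword list with a countdown of slots left,
--     consing each non-empty fragment onto the recursive result and stopping
--     as soon as ten fragments have been produced.
--     """
--     low = text.lower()
--
--     def collect(ks: List[str], remaining: int) -> List[str]:
--         if remaining == 0 or not ks:
--             return []
--         keyword, rest = ks[0], ks[1:]
--         i = low.find(keyword)
--         if i >= 0:
--             frag = text[max(0, i - 20): i + 200].strip()[:200]
--             if frag: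
--                 return [frag] + collect(rest, remaining - 1)
--         return collect(rest, remaining)
--
--     return collect(keywords, 10)
-- ===== Notes on version B (the rewrite author's own statement) =====
-- stated objective: faster
-- what changed: B replaces A's accumulator loop plus results[:10] with a recursion over the keyword list carrying a countdown of remaining slots: each non-empty fragment is consed onto the recursive result and the walk stops as soon as ten fragments exist, so no find is run for keywords beyond the tenth fragment; the redundant min(len(text), ...) clamp and pre-truncation emptiness check are also dropped.
import Mathlib
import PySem

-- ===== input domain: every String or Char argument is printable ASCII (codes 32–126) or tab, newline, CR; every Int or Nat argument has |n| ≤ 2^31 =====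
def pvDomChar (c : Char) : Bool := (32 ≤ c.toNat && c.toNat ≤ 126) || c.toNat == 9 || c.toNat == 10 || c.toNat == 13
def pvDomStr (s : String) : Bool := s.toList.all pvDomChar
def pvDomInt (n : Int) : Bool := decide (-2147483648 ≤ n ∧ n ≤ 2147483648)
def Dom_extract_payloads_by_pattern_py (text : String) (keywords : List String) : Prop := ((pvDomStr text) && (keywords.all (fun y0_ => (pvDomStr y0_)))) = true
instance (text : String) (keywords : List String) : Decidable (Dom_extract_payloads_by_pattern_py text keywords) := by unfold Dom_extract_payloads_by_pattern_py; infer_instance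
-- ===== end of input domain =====

-- B recurses over the keyword list with a countdown of remaining slots, consing fragments and
-- stopping at ten (later keywords are never searched), instead of A's loop over all keywords
-- followed by results[:10]; objective: faster (measured).

-- ===== PORT A =====
def extract_payloads_by_pattern_py (text : String) (keywords : List String) : List String :=
  let text_lower := PySem.Str.lower text
  let results := keywords.foldl (fun results keyword =>
    let idx := PySem.Str.find text_lower keyword
    if 0 ≤ idx then
      let start : Int := max 0 (idx - 20)
      let stop : Int := min (PySem.Str.len text) (idx + 200)
      let fragment := PySem.Str.strip (PySem.Str.slice text (some start) (some stop))
      if fragment ≠ "" then results ++ [PySem.Str.slice fragment none (some 200)] else results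
    else results) ([] : List String)
  PySem.List.slice results none (some (10 : Int))

-- ===== PORT B =====
-- `collect(ks, remaining)`: structural recursion on the keyword list; `remaining == 0 or not ks`
-- is the two base cases; `[frag] + collect(rest, remaining - 1)` is the cons.
def pvCollect (text low : String) : List String → Nat → List String
  | _, 0 => []
  | [], _ => []
  | keyword :: rest, remaining + 1 =>
    let i := PySem.Str.find low keyword
    if 0 ≤ i then
      let frag := PySem.Str.slice (PySem.Str.strip (PySem.Str.slice text
        (some (max 0 (i - 20))) (some (i + 200)))) none (some 200)
      if frag ≠ "" then frag :: pvCollect text low rest remaining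
      else pvCollect text low rest (remaining + 1)
    else pvCollect text low rest (remaining + 1)

def extract_payloads_by_pattern_py_alt (text : String) (keywords : List String) : List String :=
  pvCollect text (PySem.Str.lower text) keywords 10

-- ===== PRECONDITION & SPEC =====
def Spec_extract_payloads_by_pattern_py (text : String) (keywords : List String) (out : List String) : Prop := out = extract_payloads_by_pattern_py_alt text keywords
instance (text : String) (keywords : List String) (out : List String) : Decidable (Spec_extract_payloads_by_pattern_py text keywords out) := by unfold Spec_extract_payloads_by_pattern_py; infer_instance

-- ===== CLAIM (what is proved, stated in full; the proofs are below) =====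
def Claim_equal_extract_payloads_by_pattern_py : Prop := ∀ (text : String) (keywords : List String), Dom_extract_payloads_by_pattern_py text keywords → Spec_extract_payloads_by_pattern_py text keywords (extract_payloads_by_pattern_py text keywords)

-- ===== LEMMAS AND PROOFS =====

-- the (optional) fragment both programs produce for one keyword
def pvFrag (text low : String) (k : String) : Option String :=
  let i := PySem.Str.find low k
  if 0 ≤ i then
    let frag := PySem.Str.slice (PySem.Str.strip (PySem.Str.slice text
      (some (max 0 (i - 20))) (some (i + 200)))) none (some 200)
    if frag ≠ "" then some frag else none
  else none

-- clamping the stop bound at len(text) does not change a slice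
theorem pv_slice_min (text : String) (a b : Int) (ha : 0 ≤ a) (hb : 0 ≤ b) :
    PySem.Str.slice text (some a) (some (min (PySem.Str.len text) b))
      = PySem.Str.slice text (some a) (some b) := by
  have hlen : PySem.Str.len text = (text.toList.length : Int) := by
    simp [PySem.Str.len]
  have hmb : 0 ≤ min (PySem.Str.len text) b := by rw [hlen]; omega
  apply String.toList_inj.mp
  simp only [PySem.Str.toList_slice, PySem.Chars.slice_eq_listSlice]
  rw [PySem.List.slice_toNat _ ha hmb, PySem.List.slice_toNat _ ha hb]
  apply List.take_eq_take_iff.mpr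
  have := List.length_drop (l := text.toList) (i := a.toNat)
  rw [hlen]
  omega

-- s[:200] is empty exactly when s is
theorem pv_slice200_empty (s : String) :
    PySem.Str.slice s none (some 200) = "" ↔ s = "" := by
  constructor
  · intro h
    have h1 : (PySem.Str.slice s none (some 200)).toList = s.toList.take 200 := by
      rw [PySem.Str.toList_slice, PySem.Chars.slice_eq_listSlice,
        PySem.List.slice_to _ (by norm_num)]
      rfl
    have h2 : s.toList.take 200 = [] := by rw [← h1, h]; rfl
    have h3 : s.toList = [] := by simpa using h2
    exact String.toList_inj.mp (by rw [h3]; rfl)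
  · intro h; subst h; rfl

-- A's keyword loop produces exactly the filterMap of pvFrag
theorem pv_A_loop (text : String) : ∀ (ks : List String) (acc : List String),
    ks.foldl (fun results keyword =>
      let idx := PySem.Str.find (PySem.Str.lower text) keyword
      if 0 ≤ idx then
        let start : Int := max 0 (idx - 20)
        let stop : Int := min (PySem.Str.len text) (idx + 200)
        let fragment := PySem.Str.strip (PySem.Str.slice text (some start) (some stop))
        if fragment ≠ "" then results ++ [PySem.Str.slice fragment none (some 200)] else results
      else results) acc
    = acc ++ ks.filterMap (pvFrag text (PySem.Str.lower text)) := by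
  intro ks
  induction ks with
  | nil => intro acc; simp
  | cons k ks ih =>
    intro acc
    simp only [List.foldl_cons, List.filterMap_cons]
    set i := PySem.Str.find (PySem.Str.lower text) k with hi
    by_cases h0 : 0 ≤ i
    · rw [if_pos h0]
      have h200 : (0 : Int) ≤ i + 200 := by omega
      have hmax : (0 : Int) ≤ max 0 (i - 20) := le_max_left _ _
      rw [pv_slice_min text _ _ hmax h200]
      set fragment := PySem.Str.strip (PySem.Str.slice text
        (some (max 0 (i - 20))) (some (i + 200))) with hfr
      by_cases hne : fragment ≠ ""
      · rw [if_pos hne, ih]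
        have hne' : PySem.Str.slice fragment none (some 200) ≠ "" := by
          intro h; exact hne ((pv_slice200_empty fragment).mp h)
        have hc : pvFrag text (PySem.Str.lower text) k
            = some (PySem.Str.slice fragment none (some 200)) := by
          simp only [pvFrag, ← hi, ← hfr]
          rw [if_pos h0, if_pos hne']
        rw [hc]
        simp
      · rw [if_neg hne, ih]
        have heq : fragment = "" := by
          by_contra h; exact hne h
        have hne' : ¬ PySem.Str.slice fragment none (some 200) ≠ "" := by
          intro h; exact h ((pv_slice200_empty fragment).mpr heq)
        have hc : pvFrag text (PySem.Str.lower text) k = none := by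
          simp only [pvFrag, ← hi, ← hfr]
          rw [if_pos h0, if_neg hne']
        rw [hc]
    · rw [if_neg h0, ih]
      have hc : pvFrag text (PySem.Str.lower text) k = none := by
        simp only [pvFrag, ← hi]
        rw [if_neg h0]
      rw [hc]

-- B's recursion takes the first `r` entries of the same filterMap
theorem pv_collect_eq (text low : String) : ∀ (ks : List String) (r : Nat),
    pvCollect text low ks r = (ks.filterMap (pvFrag text low)).take r := by
  intro ks
  induction ks with
  | nil => intro r; cases r <;> simp [pvCollect]
  | cons k ks ih =>
    intro r
    cases r with
    | zero => simp [pvCollect]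
    | succ r =>
      simp only [pvCollect]
      set i := PySem.Str.find low k with hi
      by_cases h0 : 0 ≤ i
      · rw [if_pos h0]
        set frag := PySem.Str.slice (PySem.Str.strip (PySem.Str.slice text
          (some (max 0 (i - 20))) (some (i + 200)))) none (some 200) with hf
        by_cases hne : frag ≠ ""
        · have hc : pvFrag text low k = some frag := by
            simp only [pvFrag, ← hi, ← hf]
            rw [if_pos h0, if_pos hne]
          rw [if_pos hne, List.filterMap_cons_some hc, ih, List.take_succ_cons]
        · have hc : pvFrag text low k = none := by
            simp only [pvFrag, ← hi, ← hf]
            rw [if_pos h0, if_neg hne]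
          rw [if_neg hne, List.filterMap_cons_none hc, ih]
      · have hc : pvFrag text low k = none := by
          simp only [pvFrag, ← hi]
          rw [if_neg h0]
        rw [if_neg h0, List.filterMap_cons_none hc, ih]

-- ===== VERDICT (by name: the statement is the Claim_ definition above) =====
theorem extract_payloads_by_pattern_py_spec : Claim_equal_extract_payloads_by_pattern_py := by
  intro text keywords _
  unfold Spec_extract_payloads_by_pattern_py
  unfold extract_payloads_by_pattern_py extract_payloads_by_pattern_py_alt
  simp only []
  rw [pv_A_loop, pv_collect_eq, PySem.List.slice_to _ (by norm_num)]
  simp
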